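-- pv_equiv track=rewrite | github.com/Alex-Guha/gitrog-sims | Frawg.py | DT
-- ===== SOURCE A (Python) =====
-- def dredge(amt, lib):
--     trig = 0
--     for i in range(amt):  # take the first X out of the library
--         c = lib.pop(0)
--         if c == "d":  # found dakmor
--             return [0, 0, True]
--         elif c == "l":  # found a land
--             trig = 1
--     return [lib, trig, False]
--
-- def DT(lib, trigs):
--     while trigs > 0:  # while you still have a draw trigger
--         res = dredge(6, lib)
--         if res[2]:  # found dakmor
--             return 1
--         elif len(lib) < 6:  # got through whole library
--             return 1
--         lib = res[0]
--         trigs += res[1]  # add the trigger from dredging back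
--         trigs -= 1  # remove a trigger
--     return 0  # failed
-- ===== SOURCE B (Python) =====
-- def DT(lib, trigs):
--     # index-driven scan over 6-card chunks; does not mutate lib (A pops it empty)
--     n = len(lib)
--     i = 0
--     while trigs > 0:
--         chunk = lib[i:i+6]
--         if "d" in chunk:
--             return 1
--         if n - i < 12:
--             return 1
--         trigs += (1 if "l" in chunk else 0) - 1
--         i += 6
--     return 0
-- ===== Notes on version B (the rewrite author's own statement) =====
-- stated objective: faster
-- what changed: replaces the pop(0)-based dredge helper and in-place list mutation with a single index-driven loop reading 6-card slices, so no per-card front pops remain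
import Mathlib
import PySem

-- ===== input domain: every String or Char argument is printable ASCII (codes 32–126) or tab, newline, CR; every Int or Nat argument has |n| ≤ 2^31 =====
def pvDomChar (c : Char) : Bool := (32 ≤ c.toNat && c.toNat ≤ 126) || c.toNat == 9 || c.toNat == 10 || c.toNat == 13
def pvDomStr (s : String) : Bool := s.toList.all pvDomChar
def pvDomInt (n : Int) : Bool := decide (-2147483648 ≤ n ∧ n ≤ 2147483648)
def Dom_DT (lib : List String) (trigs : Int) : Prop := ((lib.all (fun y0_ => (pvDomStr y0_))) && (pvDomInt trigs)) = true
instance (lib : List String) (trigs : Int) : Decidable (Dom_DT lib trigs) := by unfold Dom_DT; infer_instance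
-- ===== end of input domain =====

-- B replaces A's pop(0)-based dredge helper and in-place mutation with one index-driven
-- loop over 6-card slices (return values proved equal; A mutates its lib argument, B does not).

-- ===== PORT A =====
-- dredge(amt, lib): pops amt cards off the front; returns none where Python raises
-- IndexError (pop from empty list).  Python's [0,0,True] dakmor result is ported as
-- ([], 0, true): DT only ever reads the third component when it is true.
def dredgeA : Nat → List String → Int → Option (List String × Int × Bool)
  | 0, lib, trig => some (lib, trig, false)
  | _ + 1, [], _ => none
  | n + 1, c :: rest, trig =>
      if c = "d" then some ([], 0, true)
      else dredgeA n rest (if c = "l" then 1 else trig)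

-- length bookkeeping needed by DT's termination (the full-dredge case consumes n cards)
theorem dredgeA_length (n : Nat) (lib : List String) (t : Int) (lib' : List String)
    (tr : Int) (h : dredgeA n lib t = some (lib', tr, false)) :
    lib'.length + n = lib.length := by
  induction n generalizing lib t with
  | zero => simp [dredgeA] at h; simp [h.1]
  | succ m ih =>
      cases lib with
      | nil => simp [dredgeA] at h
      | cons c rest =>
          by_cases hc : c = "d" <;> simp [dredgeA, hc] at h
          · have := ih rest _ h; simpa using by omega
  
def DT (lib : List String) (trigs : Int) : Int :=
  if trigs > 0 then
    match h : dredgeA 6 lib 0 with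
    | none => 0   -- Python raises IndexError here; excluded by Pre_DT
    | some (_, _, true) => 1          -- res[2]: found dakmor
    | some (lib', tr, false) =>
        if (lib'.length : Int) < 6 then 1
        else DT lib' (trigs + tr - 1)
  else 0
termination_by lib.length
decreasing_by
  have := dredgeA_length 6 lib 0 lib' tr h
  omega

-- ===== PORT B =====
def DT_altGo (lib : List String) (trigs : Int) (i : Nat) : Int :=
  if trigs > 0 then
    let chunk := PySem.List.slice lib (some (i : Int)) (some ((i : Int) + 6))
    if "d" ∈ chunk then 1
    else if (lib.length : Int) - (i : Int) < 12 then 1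
    else DT_altGo lib (trigs + (if "l" ∈ chunk then 1 else 0) - 1) (i + 6)
  else 0
termination_by lib.length - i
decreasing_by omega

def DT_alt (lib : List String) (trigs : Int) : Int := DT_altGo lib trigs 0

-- ===== PRECONDITION & SPEC =====
-- Pre_DT excludes exactly the inputs on which A raises IndexError: a pending trigger
-- with fewer than 6 cards left and no "d" among them makes dredge pop an empty list.
def Pre_DT (lib : List String) (trigs : Int) : Prop :=
  trigs ≤ 0 ∨ 6 ≤ lib.length ∨ "d" ∈ lib
instance (lib : List String) (trigs : Int) : Decidable (Pre_DT lib trigs) := by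
  unfold Pre_DT; infer_instance

def pvWitness_DT : List String × Int := (["l", "x", "d", "x"], 2)

def Spec_DT (lib : List String) (trigs : Int) (out : Int) : Prop := out = DT_alt lib trigs
instance (lib : List String) (trigs : Int) (out : Int) : Decidable (Spec_DT lib trigs out) := by unfold Spec_DT; infer_instance

-- ===== CLAIM (what is proved, stated in full; the proofs are below) =====
def Claim_equal_DT : Prop := ∀ (lib : List String) (trigs : Int), Dom_DT lib trigs → Pre_DT lib trigs → Spec_DT lib trigs (DT lib trigs)

-- ===== LEMMAS AND PROOFS =====

-- dredge finds a dakmor iff "d" is among the first n cards (and then returns ([],0,true))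
theorem dredgeA_d (n : Nat) (lib : List String) (t : Int) (h : "d" ∈ lib.take n) :
    dredgeA n lib t = some ([], 0, true) := by
  induction n generalizing lib t with
  | zero => simp at h
  | succ m ih =>
      cases lib with
      | nil => simp at h
      | cons c rest =>
          by_cases hc : c = "d"
          · simp [dredgeA, hc]
          · rw [dredgeA, if_neg hc]
            rcases (by simpa using h : "d" = c ∨ "d" ∈ rest.take m) with h' | h'
            · exact absurd h'.symm hc
            · exact ih rest _ h'

-- a dredge that finds no dakmor and has enough cards consumes exactly n of them and
-- reports whether a land was seen
theorem dredgeA_full (n : Nat) (lib : List String) (t : Int) (hd : "d" ∉ lib.take n)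
    (hn : n ≤ lib.length) :
    dredgeA n lib t
      = some (lib.drop n, if "l" ∈ lib.take n then 1 else t, false) := by
  induction n generalizing lib t with
  | zero => simp [dredgeA]
  | succ m ih =>
      cases lib with
      | nil => simp at hn
      | cons c rest =>
          simp at hd hn
          have hc : ¬ c = "d" := fun h => hd.1 h.symm
          have hrest : "d" ∉ rest.take m := fun h => hd.2 h
          rw [dredgeA, if_neg hc, ih rest _ hrest hn]
          by_cases hl : c = "l"
          · simp [hl]
          · have : ¬ "l" = c := fun h => hl h.symm
            simp [hl, this]

-- the chunk B slices is the prefix A's dredge consumes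
theorem chunk_eq (lib : List String) (i : Nat) :
    PySem.List.slice lib (some (i : Int)) (some ((i : Int) + 6))
      = (lib.drop i).take 6 := by
  have : ((i : Int) + 6) = ((i + 6 : Nat) : Int) := by push_cast; ring
  rw [this, PySem.List.slice_natCast]
  congr 1
  omega

theorem DT_eq_altGo (k : Nat) :
    ∀ (lib : List String) (trigs : Int) (i : Nat), lib.length - i ≤ k → i ≤ lib.length →
      (trigs ≤ 0 ∨ 6 ≤ lib.length - i ∨ "d" ∈ lib.drop i) →
      DT (lib.drop i) trigs = DT_altGo lib trigs i := by
  induction k with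
  | zero =>
      intro lib trigs i hk hi hpre
      rcases hpre with h | h | h
      · rw [DT, DT_altGo, if_neg (by omega), if_neg (by omega)]
      · omega
      · have : i < lib.length := by
          by_contra hc
          simp [List.drop_eq_nil_of_le (by omega : lib.length ≤ i)] at h
        omega
  | succ m ih =>
      intro lib trigs i hk hi hpre
      by_cases ht : trigs > 0
      · have hLlen : (lib.drop i).length = lib.length - i := by simp
        have hchunk := chunk_eq lib i
        rw [DT, if_pos ht, DT_altGo, if_pos ht]
        simp only [hchunk]
        by_cases hd : "d" ∈ (lib.drop i).take 6
        · -- dakmor found in the chunk: both sides return 1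
          rw [if_pos hd]
          split
          · rename_i heq
            rw [dredgeA_d 6 _ 0 hd] at heq; exact absurd heq (by simp)
          · rfl
          · rename_i heq
            rw [dredgeA_d 6 _ 0 hd] at heq; simp at heq
        · -- no dakmor in the chunk; Pre forces at least 6 cards left
          have h6 : 6 ≤ (lib.drop i).length := by
            rcases hpre with h | h | h
            · omega
            · omega
            · by_contra hc
              exact hd (by rwa [List.take_of_length_le (by omega)])
          rw [if_neg hd]
          have hfull := dredgeA_full 6 (lib.drop i) 0 hd (by omega)
          split
          · rename_i heq
            rw [hfull] at heq; exact absurd heq (by simp)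
          · rename_i heq
            rw [hfull] at heq; simp at heq
          · rename_i lib' tr heq
            rw [hfull] at heq
            simp only [Option.some.injEq, Prod.mk.injEq, and_true] at heq
            obtain ⟨h1, h2⟩ := heq
            subst h1; subst h2
            have hdlen : ((lib.drop i).drop 6).length = lib.length - (i + 6) := by
              rw [List.length_drop, List.length_drop]; omega
            by_cases hsmall : (lib.length : Int) - (i : Int) < 12
            · rw [if_pos (by omega : ((((lib.drop i).drop 6).length : Int)) < 6), if_pos hsmall]
            · rw [if_neg (by omega : ¬ ((((lib.drop i).drop 6).length : Int)) < 6), if_neg hsmall]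
              have hdd : (lib.drop i).drop 6 = lib.drop (i + 6) := by
                rw [List.drop_drop]
              rw [hdd]
              exact ih lib _ (i + 6) (by omega) (by omega) (by omega)
      · rw [DT, if_neg ht, DT_altGo, if_neg ht]

-- ===== VERDICT (by name: the statement is the Claim_ definition above) =====
theorem DT_spec : Claim_equal_DT := by
  intro lib trigs _ hpre
  unfold Spec_DT DT_alt
  have := DT_eq_altGo lib.length lib trigs 0 (by omega) (by omega)
    (by simpa [Pre_DT] using hpre)
  simpa using this
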